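-- pv_equiv track=rewrite | github.com/pradumana/identiQ | secure-kyc-chain/backend/app/services/transaction_analysis_service.py | _check_duplicate_transactions
-- ===== SOURCE A (Python) =====
-- from typing import Dict, Any, List, Optional
--
-- def _check_duplicate_transactions(transactions: List[Dict]) -> List[tuple]:
--     """Check for duplicate transactions (same amount, same date)"""
--     duplicates = []
--     seen = {}
--
--     for i, txn in enumerate(transactions):
--         key = (txn.get('amount'), txn.get('date'))
--         if key in seen:
--             duplicates.append((seen[key], i))
--         else:
--             seen[key] = i
--
--     return duplicates
-- ===== SOURCE B (Python) =====
-- def _check_duplicate_transactions(transactions):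
--     """Check for duplicate transactions (same amount, same date)"""
--     # Pass 1: index of the FIRST occurrence of each (amount, date) key.
--     first_occurrence = {}
--     for i, txn in enumerate(transactions):
--         key = (txn.get('amount'), txn.get('date'))
--         if key not in first_occurrence:
--             first_occurrence[key] = i
--     # Pass 2: every later occurrence pairs with the first one.
--     duplicates = []
--     for i, txn in enumerate(transactions):
--         j = first_occurrence[(txn.get('amount'), txn.get('date'))]
--         if j != i:
--             duplicates.append((j, i))
--     return duplicates
-- ===== Notes on version B (the rewrite author's own statement) =====
-- stated objective: alternative
-- what changed: A's single interleaved scan that mutates `seen` while emitting is replaced by a two-pass decomposition: first build a first-occurrence table (insert only when absent), then rescan and emit (first[key], i) whenever first[key] != i.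
import Mathlib
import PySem

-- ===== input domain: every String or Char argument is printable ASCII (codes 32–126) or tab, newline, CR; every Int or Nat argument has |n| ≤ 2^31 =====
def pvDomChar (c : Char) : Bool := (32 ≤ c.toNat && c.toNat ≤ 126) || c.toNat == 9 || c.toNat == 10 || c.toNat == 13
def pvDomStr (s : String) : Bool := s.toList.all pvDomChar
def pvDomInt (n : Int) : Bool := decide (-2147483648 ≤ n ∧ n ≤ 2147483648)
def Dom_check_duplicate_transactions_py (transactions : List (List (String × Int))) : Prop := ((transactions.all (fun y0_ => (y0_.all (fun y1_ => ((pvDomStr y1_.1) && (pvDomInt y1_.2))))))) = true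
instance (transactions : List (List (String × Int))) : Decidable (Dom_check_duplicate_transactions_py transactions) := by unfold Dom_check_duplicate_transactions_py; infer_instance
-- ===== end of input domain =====

-- B replaces A's single interleaved scan (mutating `seen` while emitting) by a build-first-occurrence-table
-- pass followed by an emit pass over the fixed table; objective: alternative decomposition, same cost.

-- key of a transaction dict: (txn.get('amount'), txn.get('date'))
def txnKey (t : List (String × Int)) : Option Int × Option Int :=
  ((PySem.Dict.mk t).get? "amount", (PySem.Dict.mk t).get? "date")

-- ===== PORT A =====
-- loop body of A: `if key in seen: duplicates.append((seen[key], i)) else: seen[key] = i`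
def aStep (st : List (Int × Int) × PySem.Dict (Option Int × Option Int) Int)
    (p : Int × List (String × Int)) : List (Int × Int) × PySem.Dict (Option Int × Option Int) Int :=
  match st.2.get? (txnKey p.2) with
  | some j => (st.1 ++ [(j, p.1)], st.2)
  | none   => (st.1, st.2.insert (txnKey p.2) p.1)

def check_duplicate_transactions_py (transactions : List (List (String × Int))) : List (Int × Int) :=
  ((PySem.List.enumerate transactions 0).foldl aStep ([], PySem.Dict.empty)).1

-- ===== PORT B =====
-- pass 1 body: `if key not in first_occurrence: first_occurrence[key] = i`
def firstStep (d : PySem.Dict (Option Int × Option Int) Int)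
    (p : Int × List (String × Int)) : PySem.Dict (Option Int × Option Int) Int :=
  if (d.get? (txnKey p.2)).isNone then d.insert (txnKey p.2) p.1 else d

-- pass 2 body: `j = first_occurrence[key]; if j != i: duplicates.append((j, i))`
-- (the `none` branch is unreachable in B: pass 1 inserts every key that occurs)
def emitStep (first : PySem.Dict (Option Int × Option Int) Int)
    (acc : List (Int × Int)) (p : Int × List (String × Int)) : List (Int × Int) :=
  match first.get? (txnKey p.2) with
  | some j => if j ≠ p.1 then acc ++ [(j, p.1)] else acc
  | none   => acc

def check_duplicate_transactions_py_alt (transactions : List (List (String × Int))) : List (Int × Int) :=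
  let first := (PySem.List.enumerate transactions 0).foldl firstStep PySem.Dict.empty
  (PySem.List.enumerate transactions 0).foldl (emitStep first) []

-- ===== PRECONDITION & SPEC =====
def Spec_check_duplicate_transactions_py (transactions : List (List (String × Int))) (out : List (Int × Int)) : Prop := out = check_duplicate_transactions_py_alt transactions
instance (transactions : List (List (String × Int))) (out : List (Int × Int)) : Decidable (Spec_check_duplicate_transactions_py transactions out) := by unfold Spec_check_duplicate_transactions_py; infer_instance

-- ===== CLAIM (what is proved, stated in full; the proofs are below) =====
def Claim_equal_check_duplicate_transactions_py : Prop := ∀ (transactions : List (List (String × Int))), Dom_check_duplicate_transactions_py transactions → Spec_check_duplicate_transactions_py transactions (check_duplicate_transactions_py transactions)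

-- ===== LEMMAS AND PROOFS =====

-- what pass 2 contributes for one element, as a list segment
def emitOne (first : PySem.Dict (Option Int × Option Int) Int)
    (p : Int × List (String × Int)) : List (Int × Int) :=
  match first.get? (txnKey p.2) with
  | some j => if j ≠ p.1 then [(j, p.1)] else []
  | none   => []

lemma emitStep_eq (first : PySem.Dict (Option Int × Option Int) Int)
    (acc : List (Int × Int)) (p : Int × List (String × Int)) :
    emitStep first acc p = acc ++ emitOne first p := by
  unfold emitStep emitOne
  rcases first.get? (txnKey p.2) with _ | j
  · simp
  · simp; split <;> simp

lemma bpass_eq_flatMap (first : PySem.Dict (Option Int × Option Int) Int)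
    (l : List (Int × List (String × Int))) (acc : List (Int × Int)) :
    l.foldl (emitStep first) acc = acc ++ l.flatMap (emitOne first) := by
  have : l.foldl (emitStep first) acc
      = l.foldl (fun acc x => acc ++ emitOne first x) acc := by
    congr 1; funext a x; exact emitStep_eq first a x
  rw [this, PySem.List.foldl_append_eq_flatMap]

-- pass 1 never overwrites: an existing binding survives
lemma firstFold_mono (l : List (Int × List (String × Int)))
    (d : PySem.Dict (Option Int × Option Int) Int) (k : Option Int × Option Int) (j : Int)
    (h : d.get? k = some j) : (l.foldl firstStep d).get? k = some j := by
  induction l generalizing d with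
  | nil => exact h
  | cons p l ih =>
    simp only [List.foldl_cons]
    apply ih
    unfold firstStep
    split
    · rw [PySem.Dict.get?_insert]
      split
      · next hk => rw [hk] at h; simp_all
      · exact h
    · exact h

-- core invariant: A's interleaved fold equals B's two-pass decomposition
lemma main_lemma (l : List (Int × List (String × Int)))
    (d : PySem.Dict (Option Int × Option Int) Int) (dups : List (Int × Int))
    (hv : ∀ k j, d.get? k = some j → ∀ p ∈ l, j ≠ p.1)
    (hpw : l.Pairwise (fun p q => p.1 ≠ q.1)) :
    l.foldl aStep (dups, d) = (dups ++ l.flatMap (emitOne (l.foldl firstStep d)), l.foldl firstStep d) := by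
  induction l generalizing d dups with
  | nil => simp
  | cons p l ih =>
    rcases hpw with - | ⟨hp, hl⟩
    simp only [List.foldl_cons, List.flatMap_cons]
    rcases hd : d.get? (txnKey p.2) with _ | j
    · -- key not seen yet: A inserts; B's table gives this very index, so pass 2 skips p
      have hstep : aStep (dups, d) p = (dups, d.insert (txnKey p.2) p.1) := by
        unfold aStep; rw [hd]
      have hfs : firstStep d p = d.insert (txnKey p.2) p.1 := by
        unfold firstStep; rw [hd]; simp
      rw [hstep, hfs]
      have hv' : ∀ k j, (d.insert (txnKey p.2) p.1).get? k = some j → ∀ q ∈ l, j ≠ q.1 := by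
        intro k j hkj q hq
        rw [PySem.Dict.get?_insert] at hkj
        split at hkj
        · cases hkj; exact hp q hq
        · exact hv k j hkj q (List.mem_cons_of_mem _ hq)
      rw [ih _ _ hv' hl]
      have hF : (l.foldl firstStep (d.insert (txnKey p.2) p.1)).get? (txnKey p.2) = some p.1 :=
        firstFold_mono l _ _ _ (PySem.Dict.get?_insert_self _ _ _)
      unfold emitOne
      rw [hF]
      simp
    · -- key already seen with earlier index j: A emits (j, i); so does pass 2, since j ≠ i
      have hstep : aStep (dups, d) p = (dups ++ [(j, p.1)], d) := by
        unfold aStep; rw [hd]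
      have hfs : firstStep d p = d := by
        unfold firstStep; rw [hd]; simp
      rw [hstep, hfs]
      have hv' : ∀ k j', d.get? k = some j' → ∀ q ∈ l, j' ≠ q.1 :=
        fun k j' h q hq => hv k j' h q (List.mem_cons_of_mem _ hq)
      rw [ih _ _ hv' hl]
      have hF : (l.foldl firstStep d).get? (txnKey p.2) = some j := firstFold_mono l d _ j hd
      unfold emitOne
      rw [hF]
      have : j ≠ p.1 := hv _ _ hd p (List.mem_cons_self)
      simp [this]

-- ===== VERDICT (by name: the statement is the Claim_ definition above) =====
theorem check_duplicate_transactions_py_spec : Claim_equal_check_duplicate_transactions_py := by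
  intro ts _
  unfold Spec_check_duplicate_transactions_py check_duplicate_transactions_py check_duplicate_transactions_py_alt
  have hpw : (PySem.List.enumerate ts 0).Pairwise (fun p q => p.1 ≠ q.1) :=
    (PySem.List.pairwise_lt_enumerate ts 0).imp (fun h => ne_of_lt h)
  have hv : ∀ k j, (PySem.Dict.empty (κ := Option Int × Option Int) (ν := Int)).get? k = some j →
      ∀ p ∈ PySem.List.enumerate ts 0, j ≠ p.1 := by
    intro k j h; rw [PySem.Dict.get?_empty] at h; exact absurd h (by simp)
  rw [main_lemma _ _ _ hv hpw, bpass_eq_flatMap]
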